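-- pv_equiv track=rewrite | github.com/M2883b0/daily_task_assistant | daily_task_assistant.py | _draft_collect_closed_code_ranges
-- ===== SOURCE A (Python) =====
-- def _draft_collect_closed_code_ranges(lines: list[str]) -> list[tuple[int, int]]:
--     ranges: list[tuple[int, int]] = []
--     start: int | None = None
--     for i, line in enumerate(lines, start=1):
--         if not line.strip().startswith("```"):
--             continue
--         if start is None:
--             start = i
--         else:
--             ranges.append((start, i))
--             start = None
--     return ranges
-- ===== SOURCE B (Python) =====
-- def _find_fence(lines: list[str]):
--     """Index of the first fence line in `lines` and the sublist after it, or None."""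
--     for j, line in enumerate(lines):
--         if line.strip().startswith("```"):
--             return j, lines[j + 1:]
--     return None
--
--
-- def _draft_collect_closed_code_ranges(lines: list[str]) -> list[tuple[int, int]]:
--     ranges: list[tuple[int, int]] = []
--     n = 1
--     rest = lines
--     while True:
--         f = _find_fence(rest)
--         if f is None:
--             break
--         j, rest = f
--         g = _find_fence(rest)
--         if g is None:
--             break
--         k, rest = g
--         ranges.append((n + j, n + j + 1 + k))
--         n = n + j + k + 2
--     return ranges
-- ===== Notes on version B (the rewrite author's own statement) =====
-- stated objective: alternative
-- what changed: Replaces the single-pass toggle over every line with a repeated search-and-slice: a helper finds the next fence line and returns the remaining sublist, and the main loop calls it twice per closed block, advancing through successive tails of the list.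
import Mathlib
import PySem

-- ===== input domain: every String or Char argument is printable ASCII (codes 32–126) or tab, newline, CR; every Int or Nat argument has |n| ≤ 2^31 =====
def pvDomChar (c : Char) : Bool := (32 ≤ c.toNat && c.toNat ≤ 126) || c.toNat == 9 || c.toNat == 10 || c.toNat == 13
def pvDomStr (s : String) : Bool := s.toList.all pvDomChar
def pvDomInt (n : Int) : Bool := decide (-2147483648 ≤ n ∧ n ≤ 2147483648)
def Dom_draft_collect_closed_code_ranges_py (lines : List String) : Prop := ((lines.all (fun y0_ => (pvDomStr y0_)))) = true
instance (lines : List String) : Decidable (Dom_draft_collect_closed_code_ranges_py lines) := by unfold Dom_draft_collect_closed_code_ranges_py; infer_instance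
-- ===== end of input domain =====

-- ===== PORT A =====
-- B replaces A's one-pass open/close toggle with repeated find-next-fence-and-slice (objective: alternative decomposition, same cost).
def aFence (line : String) : Bool :=
  PySem.Str.startswith (PySem.Str.strip line) "```"

def aLoop (ranges : List (Int × Int)) (start : Option Int) : List (Int × String) → List (Int × Int)
  | [] => ranges
  | (i, line) :: rest =>
    if ¬ aFence line then aLoop ranges start rest
    else
      match start with
      | none => aLoop ranges (some i) rest
      | some s => aLoop (ranges ++ [(s, i)]) none rest

def draft_collect_closed_code_ranges_py (lines : List String) : List (Int × Int) :=
  aLoop [] none (PySem.List.enumerate lines 1)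

-- ===== PORT B =====
-- _find_fence: index of the first fence line and the sublist after it, or none.
def bFind : List String → Option (Int × List String)
  | [] => none
  | l :: rest =>
    if aFence l then some (0, rest)
    else (bFind rest).map (fun p => (p.1 + 1, p.2))

theorem bFind_length_lt : ∀ (ls rest : List String) (j : Int),
    bFind ls = some (j, rest) → rest.length < ls.length := by
  intro ls
  induction ls with
  | nil => intro rest j h; simp [bFind] at h
  | cons l tl ih =>
    intro rest j h
    by_cases hf : aFence l
    · simp [bFind, hf] at h
      simp [← h.2]
    · cases htl : bFind tl with
      | none => simp [bFind, hf, htl] at h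
      | some p =>
        obtain ⟨j', r'⟩ := p
        simp [bFind, hf, htl] at h
        have := ih r' j' htl
        simp [← h.2]
        omega

-- the while loop of Source B: find two fences, record the pair, continue on the tail
def bLoop (ranges : List (Int × Int)) (n : Int) (rest : List String) : List (Int × Int) :=
  match hf : bFind rest with
  | none => ranges
  | some (j, rest1) =>
    match hg : bFind rest1 with
    | none => ranges
    | some (k, rest2) =>
      bLoop (ranges ++ [(n + j, n + j + 1 + k)]) (n + j + k + 2) rest2
termination_by rest.length
decreasing_by
  exact Nat.lt_trans (bFind_length_lt rest1 rest2 k hg) (bFind_length_lt rest rest1 j hf)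

def draft_collect_closed_code_ranges_py_alt (lines : List String) : List (Int × Int) :=
  bLoop [] 1 lines

-- ===== PRECONDITION & SPEC =====
def Spec_draft_collect_closed_code_ranges_py (lines : List String) (out : List (Int × Int)) : Prop := out = draft_collect_closed_code_ranges_py_alt lines
instance (lines : List String) (out : List (Int × Int)) : Decidable (Spec_draft_collect_closed_code_ranges_py lines out) := by unfold Spec_draft_collect_closed_code_ranges_py; infer_instance

-- ===== CLAIM (what is proved, stated in full; the proofs are below) =====
def Claim_equal_draft_collect_closed_code_ranges_py : Prop := ∀ (lines : List String), Dom_draft_collect_closed_code_ranges_py lines → Spec_draft_collect_closed_code_ranges_py lines (draft_collect_closed_code_ranges_py lines)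

-- ===== LEMMAS AND PROOFS =====
-- 1-based positions of the fence lines, as a direct recursion (proof vocabulary).
def fpos : List String → Int → List Int
  | [], _ => []
  | l :: rest, n => if aFence l then n :: fpos rest (n + 1) else fpos rest (n + 1)

-- pair up consecutive elements, dropping an odd last one
def pairUp : List Int → List (Int × Int)
  | a :: b :: rest => (a, b) :: pairUp rest
  | _ => []

theorem pairUp_single (x : Int) : pairUp [x] = [] := rfl

-- A's toggle loop equals accumulated ranges ++ pairing of the remaining fence
-- positions (with the pending open fence, if any, prepended).
theorem aLoop_eq (xs : List (Int × String)) :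
    ∀ (ranges : List (Int × Int)) (start : Option Int),
      aLoop ranges start xs =
        ranges ++ pairUp ((start.toList) ++
          xs.filterMap (fun p => if aFence p.2 then some p.1 else none)) := by
  induction xs with
  | nil =>
    intro ranges start
    cases start <;> simp [aLoop, pairUp]
  | cons hd tl ih =>
    intro ranges start
    obtain ⟨i, line⟩ := hd
    by_cases hf : aFence line
    · cases start with
      | none => simp [aLoop, hf, ih]
      | some s => simp [aLoop, hf, ih, pairUp]
    · cases start <;> simp [aLoop, hf, ih]

theorem filterMap_enumerate_eq_fpos (lines : List String) :
    ∀ (n : Int),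
      (PySem.List.enumerate lines n).filterMap (fun p => if aFence p.2 then some p.1 else none)
        = fpos lines n := by
  induction lines with
  | nil => intro n; simp [fpos]
  | cons l tl ih =>
    intro n
    by_cases hf : aFence l <;>
      simp [PySem.List.enumerate_cons, fpos, hf, ih]

theorem bFind_none_fpos : ∀ (ls : List String), bFind ls = none → ∀ n, fpos ls n = [] := by
  intro ls
  induction ls with
  | nil => intro _ n; simp [fpos]
  | cons l tl ih =>
    intro h n
    by_cases hf : aFence l
    · simp [bFind, hf] at h
    · simp [bFind, hf] at h
      simp [fpos, hf, ih h]

theorem bFind_some_fpos : ∀ (ls rest : List String) (j : Int),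
    bFind ls = some (j, rest) → ∀ n, fpos ls n = (n + j) :: fpos rest (n + j + 1) := by
  intro ls
  induction ls with
  | nil => intro rest j h; simp [bFind] at h
  | cons l tl ih =>
    intro rest j h n
    by_cases hf : aFence l
    · simp [bFind, hf] at h
      simp [fpos, hf, ← h.1, ← h.2]
    · cases htl : bFind tl with
      | none => simp [bFind, hf, htl] at h
      | some p =>
        obtain ⟨j', r'⟩ := p
        simp [bFind, hf, htl] at h
        have := ih r' j' htl (n + 1)
        rw [fpos, if_neg (by simpa using hf), this, ← h.1, ← h.2]
        congr 1
        · omega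
        · congr 1
          omega

theorem bLoop_eq (ls : List String) :
    ∀ (ranges : List (Int × Int)) (n : Int),
      bLoop ranges n ls = ranges ++ pairUp (fpos ls n) := by
  induction hm : ls.length using Nat.strong_induction_on generalizing ls with
  | _ m ih =>
    intro ranges n
    subst hm
    rw [bLoop]
    split
    · next hf => simp [bFind_none_fpos ls hf n, pairUp]
    · next j rest1 hf =>
      split
      · next hg =>
        rw [bFind_some_fpos ls rest1 j hf n, bFind_none_fpos rest1 hg, pairUp_single]
        simp
      · next k rest2 hg =>
        have h1 := bFind_some_fpos ls rest1 j hf n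
        have h2 := bFind_some_fpos rest1 rest2 k hg (n + j + 1)
        have hlen : rest2.length < ls.length := by
          exact Nat.lt_trans (bFind_length_lt rest1 rest2 k hg) (bFind_length_lt ls rest1 j hf)
        rw [h1, h2, ih rest2.length hlen rest2 rfl]
        simp [pairUp]
        congr 2
        omega

-- ===== VERDICT (by name: the statement is the Claim_ definition above) =====
theorem draft_collect_closed_code_ranges_py_spec : Claim_equal_draft_collect_closed_code_ranges_py := by
  intro lines _
  unfold Spec_draft_collect_closed_code_ranges_py
  unfold draft_collect_closed_code_ranges_py draft_collect_closed_code_ranges_py_alt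
  rw [aLoop_eq, bLoop_eq, filterMap_enumerate_eq_fpos]
  simp
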